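-- pv_equiv track=rewrite | github.com/littlefattiger/My_LC_solution | python/binary_search/2554. Maximum Number of Integers to Choose From a Range I.py | maxCount
-- ===== SOURCE A (Python) =====
-- from typing import List
--
-- def maxCount(banned: List[int], n: int, maxSum: int) -> int:
--
--     ban_set = set(banned)
--     tot = 0
--     count = 0
--     for i in range(1, n  + 1):
--         if i not in ban_set and tot + i <= maxSum:
--             tot += i
--             count += 1
--     return count
-- ===== SOURCE B (Python) =====
-- def maxCount(banned, n, maxSum):
--     # Binary search for the largest v in [0, n] such that the sum of the
--     # non-banned integers in [1, v] (a triangular number minus the banned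
--     # ones) fits in maxSum; the answer is v minus the banned count <= v.
--     bs = {b for b in banned if b >= 1}
--
--     def fits(v):
--         return v * (v + 1) // 2 - sum(b for b in bs if b <= v) <= maxSum
--
--     lo, hi = 0, n
--     while lo < hi:
--         mid = (lo + hi + 1) // 2
--         if fits(mid):
--             lo = mid
--         else:
--             hi = mid - 1
--     return lo - sum(1 for b in bs if b <= lo)
-- ===== Notes on version B (the rewrite author's own statement) =====
-- stated objective: alternative
-- what changed: Replaces A's linear greedy scan over 1..n with a binary search for the largest threshold v whose non-banned prefix sum (triangular number minus the banned values <= v) fits in maxSum, answering v minus the count of banned values <= v.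
import Mathlib
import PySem

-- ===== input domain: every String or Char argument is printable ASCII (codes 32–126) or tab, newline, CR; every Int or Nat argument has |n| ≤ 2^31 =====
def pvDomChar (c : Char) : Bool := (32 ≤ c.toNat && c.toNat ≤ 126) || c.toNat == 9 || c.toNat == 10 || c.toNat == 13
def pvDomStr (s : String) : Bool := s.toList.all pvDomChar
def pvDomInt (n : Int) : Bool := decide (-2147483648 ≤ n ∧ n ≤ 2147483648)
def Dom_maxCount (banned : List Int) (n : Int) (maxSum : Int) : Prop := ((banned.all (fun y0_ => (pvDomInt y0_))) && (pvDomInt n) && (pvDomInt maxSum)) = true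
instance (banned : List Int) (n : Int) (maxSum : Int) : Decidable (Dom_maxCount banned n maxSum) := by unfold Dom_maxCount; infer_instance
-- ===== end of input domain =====

-- B replaces A's linear greedy scan over [1, n] by a binary search for the largest
-- threshold v whose non-banned prefix sum fits in maxSum (objective: alternative).

-- ===== PORT A =====
def maxCount (banned : List Int) (n : Int) (maxSum : Int) : Int :=
  let banSet : PySem.Set Int := PySem.Set.ofList banned
  let r := (PySem.List.pyRange 1 (n + 1) 1).foldl
    (fun (st : Int × Int) i =>
      if banSet.contains i = false ∧ st.1 + i ≤ maxSum then (st.1 + i, st.2 + 1) else st)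
    (0, 0)
  r.2

-- ===== PORT B =====
-- fits(v) of Source B; the generator sum over the set is the sum of the filtered list
def pvFits (bs : List Int) (maxSum v : Int) : Bool :=
  decide (PySem.Int.floordiv (v * (v + 1)) 2 - (bs.filter (fun b => decide (b ≤ v))).sum ≤ maxSum)

-- the while-loop of Source B (the fuel argument only bounds the number of
-- iterations, hi - lo, so that the recursion is structural; it never changes
-- the computed value)
def pvBSLoop (bs : List Int) (maxSum : Int) : Nat → Int → Int → Int
  | 0, lo, _ => lo
  | fuel + 1, lo, hi =>
    if lo < hi then
      let mid := PySem.Int.floordiv (lo + hi + 1) 2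
      if pvFits bs maxSum mid then pvBSLoop bs maxSum fuel mid hi
      else pvBSLoop bs maxSum fuel lo (mid - 1)
    else lo

def pvBS (bs : List Int) (maxSum lo hi : Int) : Int :=
  pvBSLoop bs maxSum (hi - lo).toNat lo hi

def maxCount_alt (banned : List Int) (n : Int) (maxSum : Int) : Int :=
  let bs : PySem.Set Int := PySem.Set.ofList (banned.filter (fun b => decide (1 ≤ b)))
  let lo := pvBS bs maxSum 0 n
  lo - ((bs.filter (fun b => decide (b ≤ lo))).map (fun _ => (1 : Int))).sum

-- ===== PRECONDITION & SPEC =====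
def Spec_maxCount (banned : List Int) (n : Int) (maxSum : Int) (out : Int) : Prop := out = maxCount_alt banned n maxSum
instance (banned : List Int) (n : Int) (maxSum : Int) (out : Int) : Decidable (Spec_maxCount banned n maxSum out) := by unfold Spec_maxCount; infer_instance

-- ===== CLAIM (what is proved, stated in full; the proofs are below) =====
def Claim_equal_maxCount : Prop := ∀ (banned : List Int) (n : Int) (maxSum : Int), Dom_maxCount banned n maxSum → Spec_maxCount banned n maxSum (maxCount banned n maxSum)

-- ===== LEMMAS AND PROOFS =====

-- S plays the role of the set of distinct banned values ≥ 1.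
def pvSm (S : List Int) (v : Int) : Int := (S.filter (fun b => decide (b ≤ v))).sum
def pvCnt (S : List Int) (v : Int) : Int := ((S.filter (fun b => decide (b ≤ v))).length : Int)
-- sum of the non-banned integers in [1, v], and how many there are
def pvW (S : List Int) (v : Int) : Int := v * (v + 1) / 2 - pvSm S v
def pvC (S : List Int) (v : Int) : Int := v - pvCnt S v

lemma pv_filter_le_perm (S : List Int) (hS : S.Nodup) (v : Int) :
    (S.filter (fun b => decide (b ≤ v + 1))).Perm
      ((S.filter (fun b => decide (b ≤ v))) ++ (if (v + 1) ∈ S then [v + 1] else [])) := by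
  induction S with
  | nil => simp
  | cons a t ih =>
    rw [List.nodup_cons] at hS
    obtain ⟨hat, ht⟩ := hS
    by_cases ha : a = v + 1
    · subst ha
      have h1 : t.filter (fun b => decide (b ≤ v + 1)) = t.filter (fun b => decide (b ≤ v)) := by
        apply List.filter_congr
        intro x hx
        have : x ≠ v + 1 := fun h => hat (h ▸ hx)
        simp only [decide_eq_decide]
        omega
      simp only [List.filter_cons, decide_eq_true_eq, if_pos (by omega : (v+1:Int) ≤ v + 1),
        if_neg (by omega : ¬ (v+1:Int) ≤ v), List.mem_cons, true_or, if_pos, h1]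
      exact (List.perm_append_singleton _ _).symm
    · have hmem : ((v + 1) ∈ a :: t) ↔ ((v + 1) ∈ t) := by
        constructor
        · intro h
          rcases List.mem_cons.mp h with h | h
          · exact absurd h.symm ha
          · exact h
        · exact List.mem_cons_of_mem a
      have hle : (decide (a ≤ v + 1)) = (decide (a ≤ v)) := by
        simp only [decide_eq_decide]; omega
      have hif : (if (v + 1) ∈ a :: t then [v + 1] else ([] : List Int))
          = (if (v + 1) ∈ t then [v + 1] else []) := by
        simp only [hmem]
      rw [List.filter_cons, List.filter_cons, hle, hif]
      by_cases h2 : decide (a ≤ v) = true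
      · rw [if_pos h2, if_pos h2, List.cons_append]
        exact (ih ht).cons a
      · rw [if_neg h2, if_neg h2]
        exact ih ht

lemma pvSm_succ (S : List Int) (hS : S.Nodup) (v : Int) :
    pvSm S (v + 1) = pvSm S v + (if (v + 1) ∈ S then v + 1 else 0) := by
  unfold pvSm
  rw [(pv_filter_le_perm S hS v).sum_eq, List.sum_append]
  by_cases h : (v + 1) ∈ S <;> simp [h]

lemma pvCnt_succ (S : List Int) (hS : S.Nodup) (v : Int) :
    pvCnt S (v + 1) = pvCnt S v + (if (v + 1) ∈ S then 1 else 0) := by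
  unfold pvCnt
  rw [(pv_filter_le_perm S hS v).length_eq, List.length_append]
  by_cases h : (v + 1) ∈ S <;> simp [h]

lemma pv_tri (v : Int) : (v + 1) * (v + 1 + 1) / 2 = v * (v + 1) / 2 + (v + 1) := by
  have h1 : (v + 1) * (v + 1 + 1) = v * (v + 1) + 2 * (v + 1) := by ring
  have h2 : ∃ k, v * (v + 1) = k + k := (Int.even_mul_succ_self v)
  obtain ⟨k, hk⟩ := h2
  omega

lemma pvW_succ (S : List Int) (hS : S.Nodup) (v : Int) :
    pvW S (v + 1) = pvW S v + (if (v + 1) ∈ S then 0 else v + 1) := by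
  unfold pvW
  rw [pvSm_succ S hS v, pv_tri v]
  by_cases h : (v + 1) ∈ S <;> simp [h] <;> try ring

lemma pvW_mono (S : List Int) (hS : S.Nodup) (u v : Int) (hu : 0 ≤ u) (huv : u ≤ v) :
    pvW S u ≤ pvW S v := by
  induction v, huv using Int.le_induction with
  | base => exact le_refl _
  | succ w hw ih =>
    have := pvW_succ S hS w
    by_cases h : (w + 1) ∈ S <;> simp [h] at this <;> omega

lemma pv_filter_nonpos (S : List Int) (hpos : ∀ b ∈ S, 1 ≤ b) (v : Int) (hv : v ≤ 0) :
    S.filter (fun b => decide (b ≤ v)) = [] := by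
  rw [List.filter_eq_nil_iff]
  intro b hb
  have := hpos b hb
  simp only [decide_eq_true_eq]
  omega

lemma pvW_zero (S : List Int) (hpos : ∀ b ∈ S, 1 ≤ b) : pvW S 0 = 0 := by
  unfold pvW pvSm
  rw [pv_filter_nonpos S hpos 0 le_rfl]
  simp

lemma pvCnt_zero (S : List Int) (hpos : ∀ b ∈ S, 1 ≤ b) : pvCnt S 0 = 0 := by
  unfold pvCnt
  rw [pv_filter_nonpos S hpos 0 le_rfl]
  simp

-- A-side loop characterization
lemma pv_A_loop (banned : List Int) (maxSum : Int) (t : Nat) :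
    ∃ u : Int, 0 ≤ u ∧ u ≤ (t : Int) ∧
      (pvW (PySem.Set.ofList (banned.filter (fun b => decide (1 ≤ b)))) u ≤ maxSum ∨ u = 0) ∧
      (∀ j : Int, u < j → j ≤ (t : Int) →
        maxSum < pvW (PySem.Set.ofList (banned.filter (fun b => decide (1 ≤ b)))) j) ∧
      (PySem.List.pyRange 1 ((t : Int) + 1) 1).foldl
        (fun (st : Int × Int) i =>
          if (PySem.Set.ofList banned).contains i = false ∧ st.1 + i ≤ maxSum
          then (st.1 + i, st.2 + 1) else st) (0, 0)
        = (pvW (PySem.Set.ofList (banned.filter (fun b => decide (1 ≤ b)))) u,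
           pvC (PySem.Set.ofList (banned.filter (fun b => decide (1 ≤ b)))) u) := by
  set S := PySem.Set.ofList (banned.filter (fun b => decide (1 ≤ b))) with hSdef
  have hS : S.Nodup := hSdef ▸ PySem.Set.nodup_ofList _
  have hpos : ∀ b ∈ S, 1 ≤ b := by
    intro b hb
    rw [hSdef, PySem.Set.mem_ofList, List.mem_filter] at hb
    simpa using hb.2
  induction t with
  | zero =>
    refine ⟨0, le_refl 0, by norm_num, Or.inr rfl, by intro j h1 h2; omega, ?_⟩
    have hr : PySem.List.pyRange 1 (((0 : Nat) : Int) + 1) 1 = [] := by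
      rw [(by norm_num : (((0 : Nat) : Int) + 1) = 1)]
      exact PySem.List.pyRange_one_eq_nil (by omega)
    rw [hr]
    simp [List.foldl, pvW_zero S hpos, pvC, pvCnt_zero S hpos]
  | succ t ih =>
    obtain ⟨u, hu0, huv, hufit, hall, hfold⟩ := ih
    have hv0 : (0 : Int) ≤ (t : Int) := Int.natCast_nonneg t
    have hcast : ((t + 1 : Nat) : Int) = (t : Int) + 1 := by push_cast; ring
    have hrange : PySem.List.pyRange 1 (((t : Int) + 1) + 1) 1
        = PySem.List.pyRange 1 ((t : Int) + 1) 1 ++ [(t : Int) + 1] :=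
      PySem.List.pyRange_one_succ_right (by omega)
    have hmem : ((PySem.Set.ofList banned).contains ((t : Int) + 1) = false) ↔
        ¬ (((t : Int) + 1) ∈ S) := by
      rw [← Bool.not_eq_true, not_iff_not, PySem.Set.contains_iff, PySem.Set.mem_ofList,
        hSdef, PySem.Set.mem_ofList, List.mem_filter]
      simp only [decide_eq_true_eq]
      constructor
      · intro h
        exact ⟨h, by omega⟩
      · exact fun h => h.1
    have hWs := pvW_succ S hS (t : Int)
    have hCnts := pvCnt_succ S hS (t : Int)
    rw [hcast, hrange, List.foldl_append, hfold]
    simp only [List.foldl_cons, List.foldl_nil]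
    by_cases hfits : pvW S ((t : Int) + 1) ≤ maxSum
    · have hut : u = (t : Int) := by
        by_contra hne
        have h1 : maxSum < pvW S (t : Int) := hall (t : Int) (by omega) (by omega)
        have h2 : pvW S (t : Int) ≤ pvW S ((t : Int) + 1) :=
          pvW_mono S hS (t : Int) ((t : Int) + 1) hv0 (by omega)
        omega
      subst hut
      by_cases hmem2 : ((t : Int) + 1) ∈ S
      · refine ⟨(t : Int) + 1, by omega, by omega, Or.inl hfits, by intro j h1 h2; omega, ?_⟩
        rw [if_neg (fun hc => (hmem.mp hc.1) hmem2)]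
        have hW : pvW S ((t : Int) + 1) = pvW S (t : Int) := by
          rw [hWs, if_pos hmem2]; ring
        have hC : pvC S ((t : Int) + 1) = pvC S (t : Int) := by
          unfold pvC
          rw [hCnts, if_pos hmem2]; ring
        rw [hW, hC]
      · have hWadd : pvW S ((t : Int) + 1) = pvW S (t : Int) + ((t : Int) + 1) := by
          rw [hWs, if_neg hmem2]
        refine ⟨(t : Int) + 1, by omega, by omega, Or.inl hfits, by intro j h1 h2; omega, ?_⟩
        rw [if_pos ⟨hmem.mpr hmem2, by omega⟩]
        have hC : pvC S ((t : Int) + 1) = pvC S (t : Int) + 1 := by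
          unfold pvC
          rw [hCnts, if_neg hmem2]; ring
        rw [hC, ← hWadd]
    · refine ⟨u, hu0, by omega, hufit, ?_, ?_⟩
      · intro j h1 h2
        by_cases hj : j ≤ (t : Int)
        · exact hall j h1 hj
        · have hj : j = (t : Int) + 1 := by omega
          rw [hj]
          omega
      · by_cases hmem2 : ((t : Int) + 1) ∈ S
        · rw [if_neg (fun hc => (hmem.mp hc.1) hmem2)]
        · have hWadd : pvW S ((t : Int) + 1) = pvW S (t : Int) + ((t : Int) + 1) := by
            rw [hWs, if_neg hmem2]
          have hbig : maxSum < pvW S u + ((t : Int) + 1) := by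
            by_cases hut : u = (t : Int)
            · subst hut; omega
            · by_cases hWu : pvW S u ≤ maxSum
              · have h2 : maxSum < pvW S (u + 1) := hall (u + 1) (by omega) (by omega)
                have h3 := pvW_succ S hS u
                by_cases hm3 : (u + 1) ∈ S
                · simp [hm3] at h3
                  omega
                · simp [hm3] at h3
                  omega
              · have hu00 : u = 0 := by tauto
                subst hu00
                rw [pvW_zero S hpos] at hWu ⊢
                omega
          exact if_neg (fun hc => absurd hc.2 (by omega))

lemma pvFits_iff (bs : List Int) (maxSum v : Int) :
    pvFits bs maxSum v = true ↔ pvW bs v ≤ maxSum := by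
  unfold pvFits pvW pvSm
  rw [PySem.Int.floordiv_eq_ediv_of_pos (by omega : (0:Int) < 2)]
  simp

-- B-side binary-search characterization
lemma pv_B_loop (bs : List Int) (maxSum : Int) (hS : bs.Nodup) :
    ∀ (fuel : Nat) (lo hi : Int), (hi - lo).toNat ≤ fuel → 0 ≤ lo → lo ≤ hi →
      (pvFits bs maxSum lo = true ∨ lo = 0) →
      lo ≤ pvBSLoop bs maxSum fuel lo hi ∧ pvBSLoop bs maxSum fuel lo hi ≤ hi ∧
        (pvFits bs maxSum (pvBSLoop bs maxSum fuel lo hi) = true ∨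
          pvBSLoop bs maxSum fuel lo hi = 0) ∧
        ∀ j : Int, pvBSLoop bs maxSum fuel lo hi < j → j ≤ hi →
          pvFits bs maxSum j = false := by
  intro fuel
  induction fuel with
  | zero =>
    intro lo hi hk h0 hlh hf
    have he : pvBSLoop bs maxSum 0 lo hi = lo := rfl
    rw [he]
    exact ⟨le_refl lo, hlh, hf, by intro j hj1 hj2; exfalso; omega⟩
  | succ fuel ih =>
    intro lo hi hk h0 hlh hf
    rw [pvBSLoop]
    by_cases h : lo < hi
    · rw [if_pos h]
      have hmid2 : PySem.Int.floordiv (lo + hi + 1) 2 = (lo + hi + 1) / 2 :=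
        PySem.Int.floordiv_eq_ediv_of_pos (by omega)
      simp only [hmid2]
      have hb1 : lo + 1 ≤ (lo + hi + 1) / 2 := by omega
      have hb2 : (lo + hi + 1) / 2 ≤ hi := by omega
      by_cases hf2 : pvFits bs maxSum ((lo + hi + 1) / 2) = true
      · rw [if_pos hf2]
        obtain ⟨c1, c2, c3, c4⟩ := ih ((lo + hi + 1) / 2) hi (by omega) (by omega)
          (by omega) (Or.inl hf2)
        exact ⟨by omega, c2, c3, c4⟩
      · rw [if_neg hf2]
        obtain ⟨c1, c2, c3, c4⟩ := ih lo ((lo + hi + 1) / 2 - 1) (by omega) h0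
          (by omega) hf
        refine ⟨c1, by omega, c3, ?_⟩
        intro j hj1 hj2
        by_cases hjm : j ≤ (lo + hi + 1) / 2 - 1
        · exact c4 j hj1 hjm
        · rw [← Bool.not_eq_true]
          intro hjt
          rw [pvFits_iff] at hjt
          have hfm : ¬ pvW bs ((lo + hi + 1) / 2) ≤ maxSum :=
            fun hc => hf2 ((pvFits_iff bs maxSum _).mpr hc)
          have hmono : pvW bs ((lo + hi + 1) / 2) ≤ pvW bs j :=
            pvW_mono bs hS _ j (by omega) (by omega)
          omega
    · rw [if_neg h]
      exact ⟨le_refl lo, by omega, hf, by intro j hj1 hj2; omega⟩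

-- ===== VERDICT (by name: the statement is the Claim_ definition above) =====
theorem maxCount_spec : Claim_equal_maxCount := by
  intro banned n maxSum _
  unfold Spec_maxCount maxCount maxCount_alt
  simp only []
  set S := PySem.Set.ofList (banned.filter (fun b => decide (1 ≤ b))) with hSdef
  have hS : S.Nodup := hSdef ▸ PySem.Set.nodup_ofList _
  have hpos : ∀ b ∈ S, 1 ≤ b := by
    intro b hb
    rw [hSdef, PySem.Set.mem_ofList, List.mem_filter] at hb
    simpa using hb.2
  by_cases hn : n < 0
  · rw [PySem.List.pyRange_one_eq_nil (by omega)]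
    rw [pvBS, (by omega : (n - (0 : Int)).toNat = 0), pvBSLoop]
    rw [pv_filter_nonpos S hpos 0 le_rfl]
    simp
  · obtain ⟨u, hu0, hun, hufit, hall, hfold⟩ := pv_A_loop banned maxSum n.toNat
    have hcast : ((n.toNat : Int)) = n := Int.toNat_of_nonneg (by omega)
    rw [hcast] at hun hall hfold
    rw [← hSdef] at hfold hufit hall
    rw [hfold]
    rw [pvBS] at *
    obtain ⟨c1, c2, c3, c4⟩ := pv_B_loop S maxSum hS ((n - (0 : Int)).toNat) 0 n
      (le_refl _) (le_refl 0) (by omega) (Or.inr rfl)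
    have hur : u = pvBSLoop S maxSum ((n - (0 : Int)).toNat) 0 n := by
      rcases lt_trichotomy u (pvBSLoop S maxSum ((n - (0 : Int)).toNat) 0 n) with h | h | h
      · exfalso
        have h1 : maxSum < pvW S (pvBSLoop S maxSum ((n - (0 : Int)).toNat) 0 n) := hall _ h c2
        rcases c3 with h2 | h2
        · rw [pvFits_iff] at h2
          omega
        · omega
      · exact h
      · exfalso
        have h1 : pvFits S maxSum u = false := c4 u h hun
        rw [← Bool.not_eq_true, pvFits_iff] at h1
        rcases hufit with h2 | h2
        · exact h1 h2
        · omega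
    rw [← hur]
    have hsum : ((S.filter (fun b => decide (b ≤ u))).map (fun _ => (1 : Int))).sum
        = ((S.filter (fun b => decide (b ≤ u))).length : Int) := by
      rw [PySem.List.sum_map_const_int]
      ring
    simp only [pvC, pvCnt, hsum]
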